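-- pv_equiv track=rewrite | github.com/RGeex/tasks | randomes/calculations/prime_dividers.py | sum_for_list
-- ===== SOURCE A (Python) =====
-- def sum_for_list(lst: list) -> list[list]:
--     """Поиск суммы сгруппированных простых делителей."""
--     res = {}
--     for num in lst:
--         tmp, dl = num, 1
--
--         while abs(tmp) > dl:
--             dl += 1
--             if not tmp % dl:
--                 res[dl] = res.get(dl, 0) + num
--                 while not tmp % dl:
--                     tmp //= dl
--
--     return sorted([k, v] for k, v in res.items())
-- ===== SOURCE B (Python) =====
-- def sum_for_list(lst: list) -> list[list]:
--     """Поиск суммы сгруппированных простых делителей."""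
--     res = {}
--     for num in lst:
--         m = abs(num)
--         d = 2
--         while d * d <= m:
--             if m % d == 0:
--                 res[d] = res.get(d, 0) + num
--                 while m % d == 0:
--                     m //= d
--             d += 1
--         if m > 1:
--             res[m] = res.get(m, 0) + num
--     return sorted([k, v] for k, v in res.items())
-- ===== Notes on version B (the rewrite author's own statement) =====
-- stated objective: faster
-- what changed: Trial division only up to sqrt(|num|) with the remaining cofactor recognised as the last prime factor, instead of scanning every candidate divisor up to |num| itself.
import Mathlib
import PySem

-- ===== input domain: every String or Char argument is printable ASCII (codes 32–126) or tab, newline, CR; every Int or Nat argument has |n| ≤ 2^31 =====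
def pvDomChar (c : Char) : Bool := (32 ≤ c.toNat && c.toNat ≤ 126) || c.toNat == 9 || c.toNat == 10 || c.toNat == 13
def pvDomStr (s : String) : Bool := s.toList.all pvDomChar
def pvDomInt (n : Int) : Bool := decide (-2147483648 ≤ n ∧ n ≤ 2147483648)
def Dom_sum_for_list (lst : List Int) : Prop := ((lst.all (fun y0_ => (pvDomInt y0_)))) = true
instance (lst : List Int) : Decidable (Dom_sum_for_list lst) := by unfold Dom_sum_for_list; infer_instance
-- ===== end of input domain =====

-- B replaces A's divisor scan up to |num| by trial division up to sqrt(|num|), the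
-- remaining cofactor > 1 being the last prime factor (objective: faster, asymptotic).


-- ===== PORT A =====
-- termination fact for the inner strip loops: an exact division by d ≥ 2 shrinks |t|
theorem pvFdivAbsLt (t d : Int) (h2 : 2 ≤ d) (hnz : t ≠ 0)
    (hm : PySem.Int.mod t d = 0) :
    (PySem.Int.floordiv t d).natAbs < t.natAbs := by
  have hd : d ∣ t := (PySem.Int.mod_eq_zero_iff_dvd t d).1 hm
  rw [PySem.Int.floordiv_eq_ediv_of_pos (by omega)]
  rw [Int.natAbs_ediv_of_dvd hd]
  have h1 : 0 < t.natAbs := Int.natAbs_pos.2 hnz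
  exact Nat.div_lt_self h1 (by omega)

-- inner 'while not tmp % dl: tmp //= dl'; the guards 2 ≤ dl ∧ tmp ≠ 0 only make the
-- recursion total (they hold whenever the Python reaches this loop)
def pvStripA (tmp dl : Int) : Int :=
  if h : 2 ≤ dl ∧ tmp ≠ 0 ∧ PySem.Int.mod tmp dl = 0 then
    pvStripA (PySem.Int.floordiv tmp dl) dl
  else tmp
termination_by tmp.natAbs
decreasing_by exact pvFdivAbsLt _ _ h.1 h.2.1 h.2.2

-- |pvStripA tmp dl| ≤ |tmp| (cited by pvLoopA's decreasing_by)
theorem pvStripA_natAbs_le (tmp dl : Int) : (pvStripA tmp dl).natAbs ≤ tmp.natAbs := by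
  induction tmp using pvStripA.induct (dl := dl) with
  | case1 tmp h ih =>
    rw [pvStripA, dif_pos h]
    exact le_trans ih (le_of_lt (pvFdivAbsLt _ _ h.1 h.2.1 h.2.2))
  | case2 tmp h => rw [pvStripA, dif_neg h]

-- outer 'while abs(tmp) > dl: dl += 1; if not tmp % dl: res[dl] = res.get(dl,0)+num; …'
def pvLoopA (tmp dl num : Int) (res : PySem.Dict Int Int) : PySem.Dict Int Int :=
  if h : dl < (tmp.natAbs : Int) then
    if PySem.Int.mod tmp (dl + 1) = 0 then
      pvLoopA (pvStripA tmp (dl + 1)) (dl + 1) num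
        (res.insert (dl + 1) (res.getD (dl + 1) 0 + num))
    else
      pvLoopA tmp (dl + 1) num res
  else res
termination_by ((tmp.natAbs : Int) - dl).toNat
decreasing_by
  · have hle := pvStripA_natAbs_le tmp (dl + 1)
    omega
  · omega

def sum_for_list (lst : List Int) : List (List Int) :=
  let res := lst.foldl (fun res num => pvLoopA num 1 num res) PySem.Dict.empty
  PySem.List.sorted (res.items.map (fun kv => [kv.1, kv.2])) (fun x => x) false

-- ===== PORT B =====
-- inner 'while m % d == 0: m //= d' (same totality guards as on the A side)
def pvStripB (m d : Int) : Int :=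
  if h : 2 ≤ d ∧ m ≠ 0 ∧ PySem.Int.mod m d = 0 then
    pvStripB (PySem.Int.floordiv m d) d
  else m
termination_by m.natAbs
decreasing_by exact pvFdivAbsLt _ _ h.1 h.2.1 h.2.2

-- |pvStripB m d| ≤ |m| (cited by pvLoopB's decreasing_by)
theorem pvStripB_natAbs_le (m d : Int) : (pvStripB m d).natAbs ≤ m.natAbs := by
  induction m using pvStripB.induct (d := d) with
  | case1 m h ih =>
    rw [pvStripB, dif_pos h]
    exact le_trans ih (le_of_lt (pvFdivAbsLt _ _ h.1 h.2.1 h.2.2))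
  | case2 m h => rw [pvStripB, dif_neg h]

-- 'while d * d <= m: …'; returns the final m with the dict (the guard 2 ≤ d only
-- makes the recursion total; every call from the Python has d ≥ 2)
def pvLoopB (m d num : Int) (res : PySem.Dict Int Int) : Int × PySem.Dict Int Int :=
  if h : d * d ≤ m ∧ 2 ≤ d then
    if PySem.Int.mod m d = 0 then
      pvLoopB (pvStripB m d) (d + 1) num (res.insert d (res.getD d 0 + num))
    else
      pvLoopB m (d + 1) num res
  else (m, res)
termination_by (m - d).toNat
decreasing_by
  · have hle := pvStripB_natAbs_le m d
    have hm0 : d < m := by nlinarith [h.1, h.2]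
    have h1 : pvStripB m d ≤ ((pvStripB m d).natAbs : Int) := Int.le_natAbs
    omega
  · have hm0 : d < m := by nlinarith [h.1, h.2]
    omega

def pvBodyB (num : Int) (res : PySem.Dict Int Int) : PySem.Dict Int Int :=
  let p := pvLoopB (num.natAbs : Int) 2 num res
  if 1 < p.1 then p.2.insert p.1 (p.2.getD p.1 0 + num) else p.2

def sum_for_list_alt (lst : List Int) : List (List Int) :=
  let res := lst.foldl (fun res num => pvBodyB num res) PySem.Dict.empty
  PySem.List.sorted (res.items.map (fun kv => [kv.1, kv.2])) (fun x => x) false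

-- ===== PRECONDITION & SPEC =====
def Spec_sum_for_list (lst : List Int) (out : List (List Int)) : Prop := out = sum_for_list_alt lst
instance (lst : List Int) (out : List (List Int)) : Decidable (Spec_sum_for_list lst out) := by unfold Spec_sum_for_list; infer_instance

-- ===== CLAIM (what is proved, stated in full; the proofs are below) =====
def Claim_equal_sum_for_list : Prop := ∀ (lst : List Int), Dom_sum_for_list lst → Spec_sum_for_list lst (sum_for_list lst)

-- ===== LEMMAS AND PROOFS =====

-- the strip result divides its input
theorem pvStripA_dvd (tmp dl : Int) : pvStripA tmp dl ∣ tmp := by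
  induction tmp using pvStripA.induct (dl := dl) with
  | case1 tmp h ih =>
    rw [pvStripA, dif_pos h]
    refine ih.trans ?_
    have hd : dl ∣ tmp := (PySem.Int.mod_eq_zero_iff_dvd tmp dl).1 h.2.2
    rw [PySem.Int.floordiv_eq_ediv_of_pos (by omega : (0:Int) < dl)]
    exact Int.ediv_dvd_of_dvd hd
  | case2 tmp h => rw [pvStripA, dif_neg h]

-- dl no longer divides the strip result
theorem pvStripA_not_dvd (tmp dl : Int) (h2 : 2 ≤ dl) (h0 : tmp ≠ 0) :
    ¬ dl ∣ pvStripA tmp dl := by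
  induction tmp using pvStripA.induct (dl := dl) with
  | case1 tmp h ih =>
    rw [pvStripA, dif_pos h]
    apply ih
    intro hz
    have hd : dl ∣ tmp := (PySem.Int.mod_eq_zero_iff_dvd tmp dl).1 h.2.2
    have := Int.ediv_mul_cancel hd
    rw [PySem.Int.floordiv_eq_ediv_of_pos (by omega : (0:Int) < dl)] at hz
    rw [hz] at this
    simp at this
    exact h.2.1 this.symm
  | case2 tmp h =>
    rw [pvStripA, dif_neg h]
    intro hdvd
    exact h ⟨h2, h0, (PySem.Int.mod_eq_zero_iff_dvd tmp dl).2 hdvd⟩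

-- exact floor division commutes with |·|
theorem pvFdivNatAbs (t d : Int) (h2 : 2 ≤ d) (hd : d ∣ t) :
    PySem.Int.floordiv ((t.natAbs : Int)) d = (((PySem.Int.floordiv t d).natAbs : Int)) := by
  rw [PySem.Int.floordiv_eq_ediv_of_pos (by omega : (0:Int) < d),
      PySem.Int.floordiv_eq_ediv_of_pos (by omega : (0:Int) < d)]
  rw [Int.natAbs_ediv_of_dvd hd]
  push_cast [Int.natCast_div]
  rw [abs_of_nonneg (by omega : (0:Int) ≤ d)]

-- pvStripB on |t| computes |pvStripA t d|
theorem pvStrip_natAbs (tmp dl : Int) :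
    pvStripB ((tmp.natAbs : Int)) dl = (((pvStripA tmp dl).natAbs : Int)) := by
  induction tmp using pvStripA.induct (dl := dl) with
  | case1 tmp h ih =>
    obtain ⟨h2, h0, hm⟩ := h
    have hd : dl ∣ tmp := (PySem.Int.mod_eq_zero_iff_dvd tmp dl).1 hm
    have hdabs : dl ∣ ((tmp.natAbs : Int)) := (Int.dvd_natAbs).2 hd
    rw [pvStripB, dif_pos ⟨h2, by simpa using h0, (PySem.Int.mod_eq_zero_iff_dvd _ dl).2 hdabs⟩]
    rw [pvStripA, dif_pos ⟨h2, h0, hm⟩]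
    rw [pvFdivNatAbs tmp dl h2 hd]
    exact ih
  | case2 tmp h =>
    rw [pvStripA, dif_neg h, pvStripB]
    rw [dif_neg]
    intro ⟨h2, h0, hm⟩
    apply h
    refine ⟨h2, by simpa using h0, ?_⟩
    have hdabs : dl ∣ ((tmp.natAbs : Int)) := (PySem.Int.mod_eq_zero_iff_dvd _ dl).1 hm
    exact (PySem.Int.mod_eq_zero_iff_dvd _ dl).2 ((Int.dvd_natAbs).1 hdabs)

-- stripping d out of d itself gives 1
theorem pvStripB_self (d : Int) (h2 : 2 ≤ d) : pvStripB d d = 1 := by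
  rw [pvStripB, dif_pos ⟨h2, by omega, (PySem.Int.mod_eq_zero_iff_dvd d d).2 dvd_rfl⟩]
  rw [PySem.Int.floordiv_eq_ediv_of_pos (by omega : (0:Int) < d), Int.ediv_self (by omega)]
  rw [pvStripB, dif_neg]
  intro ⟨_, _, hm⟩
  have : d ∣ (1:Int) := (PySem.Int.mod_eq_zero_iff_dvd 1 d).1 hm
  have := Int.le_of_dvd (by omega) this
  omega

-- a number all of whose divisors in [2, d) are absent, divisible by d and below d²,
-- IS d (its cofactor has no prime factor available)
theorem pvCofactorEq (n d : Nat) (h2 : 2 ≤ d) (hdvd : d ∣ n) (hlt : n < d * d)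
    (hsmall : ∀ e : Nat, 2 ≤ e → e < d → ¬ e ∣ n) (hn : 0 < n) : n = d := by
  obtain ⟨k, hk⟩ := hdvd
  rcases Nat.lt_or_ge k 2 with hk2 | hk2
  · interval_cases k <;> omega
  · obtain ⟨p, pp, pdvd⟩ := Nat.exists_prime_and_dvd (show k ≠ 1 by omega)
    have hpn : p ∣ n := hk ▸ pdvd.mul_left d
    have hp2 := pp.two_le
    have hpd : d ≤ p := by
      by_contra hcon
      push_neg at hcon
      exact hsmall p hp2 hcon hpn
    have hkp : p ≤ k := Nat.le_of_dvd (by omega) pdvd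
    nlinarith

-- core synchronisation: A's scan from dl (no divisor of tmp in [2, dl]) equals B's
-- scan of |tmp| from dl+1 followed by B's cofactor insertion
theorem pvSync (tmp dl num : Int) (res : PySem.Dict Int Int) (h1 : 1 ≤ dl)
    (hinv : ∀ e : Int, 2 ≤ e → e ≤ dl → ¬ e ∣ tmp) :
    pvLoopA tmp dl num res =
      (let p := pvLoopB ((tmp.natAbs : Int)) (dl + 1) num res
       if 1 < p.1 then p.2.insert p.1 (p.2.getD p.1 0 + num) else p.2) := by
  induction tmp, dl, res using pvLoopA.induct (num := num) with
  | case1 tmp dl res h hm ih =>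
    -- dl < |tmp| and (dl+1) ∣ tmp
    have h0 : tmp ≠ 0 := by
      intro hz; rw [hz] at h; simp at h; omega
    have hd : (dl + 1) ∣ tmp := (PySem.Int.mod_eq_zero_iff_dvd tmp (dl + 1)).1 hm
    have hdm : (dl + 1) ∣ ((tmp.natAbs : Int)) := (Int.dvd_natAbs).2 hd
    have h2 : (2:Int) ≤ dl + 1 := by omega
    rw [pvLoopA, dif_pos h, if_pos hm]
    set tmp' := pvStripA tmp (dl + 1) with htmp'
    have hinv' : ∀ e : Int, 2 ≤ e → e ≤ dl + 1 → ¬ e ∣ tmp' := by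
      intro e he2 hele hedvd
      rcases lt_or_ge dl e with hlt | hle
      · have : e = dl + 1 := by omega
        rw [this] at hedvd
        exact pvStripA_not_dvd tmp (dl + 1) h2 h0 hedvd
      · exact hinv e he2 hle (hedvd.trans (pvStripA_dvd tmp (dl + 1)))
    rw [ih (by omega) hinv']
    rcases le_or_gt ((dl + 1) * (dl + 1)) ((tmp.natAbs : Int)) with hsq | hsq
    · -- both loops take the same dividing step
      have hmabs : PySem.Int.mod ((tmp.natAbs : Int)) (dl + 1) = 0 :=
        (PySem.Int.mod_eq_zero_iff_dvd _ _).2 hdm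
      conv_rhs => rw [pvLoopB, dif_pos ⟨hsq, h2⟩, if_pos hmabs]
      rw [pvStrip_natAbs tmp (dl + 1)]
    · -- B's loop has stopped: tmp must BE ±(dl+1); both sides insert it and finish
      have hmeq : (tmp.natAbs : Int) = dl + 1 := by
        have hnat : tmp.natAbs = (dl + 1).toNat := by
          have hc : ((dl + 1).toNat : Int) = dl + 1 := by omega
          have hdt : (dl + 1).toNat = (dl + 1).natAbs := by omega
          apply pvCofactorEq tmp.natAbs (dl + 1).toNat (by omega)
          · have := Int.natAbs_dvd_natAbs.2 hdm
            simpa [hdt] using this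
          · have hlt2 : ((tmp.natAbs : Int)) < ((dl + 1).toNat : Int) * ((dl + 1).toNat : Int) := by
              rw [hc]; exact hsq
            exact_mod_cast hlt2
          · intro e he2 helt hedvd
            have : (e : Int) ∣ tmp := by
              have he : (e : Int) ∣ ((tmp.natAbs : Int)) := Int.natCast_dvd_natCast.2 hedvd
              exact (Int.dvd_natAbs).1 he
            exact hinv e (by omega) (by omega) this
          · omega
        omega
      have htmp1 : ((tmp'.natAbs : Int)) = 1 := by
        rw [htmp', ← pvStrip_natAbs tmp (dl + 1), hmeq]
        exact pvStripB_self (dl + 1) h2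
      -- the recursive-side loop does nothing on |tmp'| = 1
      conv_lhs => rw [pvLoopB, dif_neg (by rw [htmp1]; intro ⟨hc, hc2⟩; nlinarith)]
      conv_rhs => rw [pvLoopB, dif_neg (by intro ⟨hc, _⟩; omega)]
      simp only [htmp1, hmeq]
      rw [if_neg (by omega), if_pos (by omega)]
  | case2 tmp dl res h hm ih =>
    rw [pvLoopA, dif_pos h, if_neg hm]
    have hnd : ¬ (dl + 1) ∣ tmp := fun hd => hm ((PySem.Int.mod_eq_zero_iff_dvd _ _).2 hd)
    have hinv' : ∀ e : Int, 2 ≤ e → e ≤ dl + 1 → ¬ e ∣ tmp := by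
      intro e he2 hele
      rcases lt_or_ge dl e with hlt | hle
      · have : e = dl + 1 := by omega
        rw [this]; exact hnd
      · exact hinv e he2 hle
    rw [ih (by omega) hinv']
    rcases le_or_gt ((dl + 1) * (dl + 1)) ((tmp.natAbs : Int)) with hsq | hsq
    · have hmabs : PySem.Int.mod ((tmp.natAbs : Int)) (dl + 1) ≠ 0 := by
        intro hz
        exact hnd ((Int.dvd_natAbs).1 ((PySem.Int.mod_eq_zero_iff_dvd _ _).1 hz))
      conv_rhs => rw [pvLoopB, dif_pos ⟨hsq, by omega⟩, if_neg hmabs]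
    · conv_rhs => rw [pvLoopB, dif_neg (by intro ⟨hc, _⟩; omega)]
      conv_lhs => rw [pvLoopB, dif_neg (by intro ⟨hc, _⟩; nlinarith)]
  | case3 tmp dl res h =>
    -- |tmp| ≤ dl: with the invariant this forces |tmp| ≤ 1, and B does nothing
    have habs : (tmp.natAbs : Int) ≤ 1 := by
      by_contra hcon
      push_neg at hcon
      have hself : ((tmp.natAbs : Int)) ∣ tmp := (Int.natAbs_dvd).2 dvd_rfl
      exact hinv ((tmp.natAbs : Int)) (by omega) (by omega) hself
    rw [pvLoopA, dif_neg h]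
    rw [pvLoopB, dif_neg (by intro ⟨hc, hc2⟩; nlinarith)]
    simp only []
    rw [if_neg (by omega)]

-- per-element bodies agree
theorem pvBody_eq (num : Int) (res : PySem.Dict Int Int) :
    pvLoopA num 1 num res = pvBodyB num res := by
  rw [pvBodyB]
  exact pvSync num 1 num res (by omega) (by intro e he2 hele; omega)

-- ===== VERDICT (by name: the statement is the Claim_ definition above) =====
theorem sum_for_list_spec : Claim_equal_sum_for_list := by
  intro lst _
  unfold Spec_sum_for_list sum_for_list sum_for_list_alt
  have : (fun (res : PySem.Dict Int Int) (num : Int) => pvLoopA num 1 num res) =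
      (fun res num => pvBodyB num res) := by
    funext res num
    exact pvBody_eq num res
  rw [this]
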